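-- pv_equiv track=rewrite | github.com/CalvinFronda/aoc | 2025/day4/part2.py | helper
-- ===== SOURCE A (Python) =====
-- def helper(grid):
--     res = 0
--     dirs = [
--         (-1, 0),  # top
--         (-1, 1),  # top-right
--         (0, 1),  # right
--         (1, 1),  # bottom-right
--         (1, 0),  # bottom
--         (1, -1),  # bottom-left
--         (0, -1),  # left
--         (-1, -1),  # top-left
--     ]
--     rows = len(grid)
--     cols = len(grid[0])
--     while True:
--         new_grid = [r[:] for r in grid]
--         count_this_round = 0
--
--         for row in range(rows):
--             for col in range(cols):
--                 if grid[row][col] != "@":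
--                     continue
--
--                 count = 0
--                 # run each dir on a cell
--                 for dr, dc in dirs:
--                     nr = row + dr
--                     nc = col + dc
--
--                     if 0 <= nr < rows and 0 <= nc < cols:
--                         if grid[nr][nc] == "@":
--                             count += 1
--
--                 if count < 4:
--                     new_grid[row][col] = "."
--                     count_this_round += 1
--
--         res += count_this_round
--
--         if new_grid == grid:
--             break
--
--         grid = new_grid
--
--     return res
-- ===== SOURCE B (Python) =====
-- def helper(grid):
--     # B: worklist cascade (k-core style peeling) — remove unsupported cells one
--     # at a time, re-examining only the neighbours of each removed cell, instead
--     # of rescanning the whole grid round after round; answer = len(removed).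
--     rows, cols = len(grid), len(grid[0])
--     dirs = ((-1, 0), (-1, 1), (0, 1), (1, 1), (1, 0), (1, -1), (0, -1), (-1, -1))
--     alive = {(r, c) for r in range(rows) for c in range(cols) if grid[r][c] == "@"}
--
--     def support(p, removed):
--         r, c = p
--         return sum((r + dr, c + dc) in alive and (r + dr, c + dc) not in removed
--                    for dr, dc in dirs)
--
--     removed = set()
--     queue = [p for p in alive if support(p, removed) < 4]
--     i = 0
--     while i < len(queue):
--         p = queue[i]
--         i += 1
--         if p in removed:
--             continue
--         removed.add(p)
--         r, c = p
--         for dr, dc in dirs: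
--             q = (r + dr, c + dc)
--             if q in alive and q not in removed and support(q, removed) < 4:
--                 queue.append(q)
--     return len(removed)
-- ===== Notes on version B (the rewrite author's own statement) =====
-- stated objective: alternative
-- what changed: B replaces A's synchronous copy-and-rescan rounds over the whole grid with a single worklist cascade (k-core peeling): cells with fewer than 4 alive neighbours are queued, removed one at a time, and only the neighbours of a removed cell are re-examined; the answer is the number of removed cells.
import Mathlib
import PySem

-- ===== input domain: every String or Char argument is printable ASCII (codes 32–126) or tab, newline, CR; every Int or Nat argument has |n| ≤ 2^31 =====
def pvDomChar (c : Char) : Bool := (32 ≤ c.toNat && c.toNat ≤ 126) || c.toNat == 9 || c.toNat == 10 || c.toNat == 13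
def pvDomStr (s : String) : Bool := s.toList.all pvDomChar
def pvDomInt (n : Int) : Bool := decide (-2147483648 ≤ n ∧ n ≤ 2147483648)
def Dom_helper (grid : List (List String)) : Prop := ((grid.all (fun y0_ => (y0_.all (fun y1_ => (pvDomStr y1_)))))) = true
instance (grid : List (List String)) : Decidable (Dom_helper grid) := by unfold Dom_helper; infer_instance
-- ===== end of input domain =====

-- B replaces A's synchronous whole-grid rescan rounds by a one-pass worklist cascade
-- (k-core peeling) that re-examines only neighbours of removed cells; return value only.

-- ===== PORT A =====
-- shared by both ports: the 8 neighbour directions (the same literal appears in both Pythons)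
def pvDirs : List (Int × Int) :=
  [(-1, 0), (-1, 1), (0, 1), (1, 1), (1, 0), (1, -1), (0, -1), (-1, -1)]

-- grid[r][c]; every access either sits behind the 0 ≤ · < rows/cols guard or is in range
-- under Pre_helper, so the defaults are never observed (exact there)
def pvGet (g : List (List String)) (r c : Int) : String :=
  PySem.List.pyGetD (PySem.List.pyGetD g r []) c ""

-- A's inner `for dr, dc in dirs` counting loop
def pvCountA (g : List (List String)) (rows cols r c : Int) : Int :=
  pvDirs.foldl (fun count d =>
    let nr := r + d.1
    let nc := c + d.2
    if 0 ≤ nr ∧ nr < rows ∧ 0 ≤ nc ∧ nc < cols then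
      if pvGet g nr nc = "@" then count + 1 else count
    else count) 0

-- new_grid[row][col] = v ; row,col come from range() hence ≥ 0 and in range under Pre_helper
def pvSetA (g : List (List String)) (r c : Int) (v : String) : List (List String) :=
  g.modify r.toNat (fun row => row.set c.toNat v)

-- one round: the two nested `for row in range(rows) / for col in range(cols)` loops,
-- state = (new_grid, count_this_round); new_grid starts as a copy of grid
def pvRoundA (g : List (List String)) (rows cols : Int) : List (List String) × Int :=
  (PySem.List.pyRange 0 rows 1).foldl (fun st r =>
    (PySem.List.pyRange 0 cols 1).foldl (fun st c =>
      if pvGet g r c ≠ "@" then st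
      else if pvCountA g rows cols r c < 4 then (pvSetA st.1 r c ".", st.2 + 1)
      else st) st) (g, 0)

-- A's `while True` loop; fuel only makes it total (rows*cols+1 rounds always suffice,
-- proved in pvLoopA_eq below — each non-final round removes at least one "@")
def pvLoopA (fuel : Nat) (g : List (List String)) (rows cols res : Int) : Int :=
  match fuel with
  | 0 => res
  | fuel + 1 =>
    let st := pvRoundA g rows cols
    let res2 := res + st.2
    if st.1 = g then res2 else pvLoopA fuel st.1 rows cols res2

def helper (grid : List (List String)) : Int :=
  let rows : Int := (grid.length : Int)
  let cols : Int := ((PySem.List.pyGetD grid 0 []).length : Int)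
  pvLoopA (grid.length * (PySem.List.pyGetD grid 0 []).length + 1) grid rows cols 0

-- ===== PORT B =====
-- the coordinate comprehension `{(r,c) for r in range(rows) for c in range(cols) ...}`:
-- a Python set of pairwise-distinct coordinates, held in row-major order (only its
-- membership and size are used, so the set's iteration order is immaterial)
def pvPairs (rows cols : Int) : List (Int × Int) :=
  (PySem.List.pyRange 0 rows 1).flatMap (fun r =>
    (PySem.List.pyRange 0 cols 1).map (fun c => (r, c)))

def pvAlive (grid : List (List String)) (cols : Int) : List (Int × Int) :=
  (pvPairs (grid.length : Int) cols).filter (fun p => decide (pvGet grid p.1 p.2 = "@"))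

-- support(p, removed): `sum((r+dr,c+dc) in alive and (r+dr,c+dc) not in removed for ...)`
def pvSupport (alive removed : List (Int × Int)) (p : Int × Int) : Int :=
  pvDirs.foldl (fun s d =>
    s + (if (p.1 + d.1, p.2 + d.2) ∈ alive ∧ (p.1 + d.1, p.2 + d.2) ∉ removed then 1 else 0)) 0

-- B's `while i < len(queue)` worklist: pending = queue[i:], removed is a set (distinct,
-- insertion order); fuel only makes the loop total (queue0.length + 9*alive.length always
-- suffices, proved in pvBFS_core below: each removal appends at most 8 cells)
def pvBFS (fuel : Nat) (alive removed pending : List (Int × Int)) : List (Int × Int) :=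
  match fuel, pending with
  | _, [] => removed
  | 0, _ :: _ => removed
  | fuel + 1, p :: rest =>
    if p ∈ removed then pvBFS fuel alive removed rest
    else
      let removed2 := removed ++ [p]
      let pushes := pvDirs.filterMap (fun d =>
        let q := (p.1 + d.1, p.2 + d.2)
        if q ∈ alive ∧ q ∉ removed2 ∧ pvSupport alive removed2 q < 4 then some q else none)
      pvBFS fuel alive removed2 (rest ++ pushes)

def helper_alt (grid : List (List String)) : Int :=
  let cols : Int := ((PySem.List.pyGetD grid 0 []).length : Int)
  let alive := pvAlive grid cols
  let queue0 := alive.filter (fun p => decide (pvSupport alive [] p < 4))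
  ((pvBFS (queue0.length + 9 * alive.length) alive [] queue0).length : Int)

-- ===== PRECONDITION & SPEC =====
-- A raises IndexError on the empty grid (len(grid[0])) and on any row shorter than
-- row 0 (grid[row][col] / new_grid[row][col] for col < cols); exactly those are excluded.
def Pre_helper (grid : List (List String)) : Prop :=
  grid ≠ [] ∧ ∀ row ∈ grid, (PySem.List.pyGetD grid 0 []).length ≤ row.length
instance (grid : List (List String)) : Decidable (Pre_helper grid) := by
  unfold Pre_helper; infer_instance

def pvWitness_helper : List (List String) := [["@", "@"], ["@", "@"]]

def Spec_helper (grid : List (List String)) (out : Int) : Prop := out = helper_alt grid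
instance (grid : List (List String)) (out : Int) : Decidable (Spec_helper grid out) := by
  unfold Spec_helper; infer_instance

-- ===== CLAIM (what is proved, stated in full; the proofs are below) =====
def Claim_equal_helper : Prop :=
  ∀ (grid : List (List String)), Dom_helper grid → Pre_helper grid → Spec_helper grid (helper grid)

-- ===== LEMMAS AND PROOFS =====

-- proof-side notions ---------------------------------------------------------

-- grid well-formedness carried through A's rounds: rows*cols rectangle available
def pGOK (g : List (List String)) (rows cols : Int) : Prop :=
  g.length = rows.toNat ∧ ∀ i (h : i < g.length), cols.toNat ≤ g[i].length

-- the alive set of an arbitrary intermediate grid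
def pAliveI (g : List (List String)) (rows cols : Int) : List (Int × Int) :=
  (pvPairs rows cols).filter (fun p => decide (pvGet g p.1 p.2 = "@"))

-- the cells A removes in one round from g
def pRemoved (g : List (List String)) (rows cols : Int) : List (Int × Int) :=
  (pvPairs rows cols).filter
    (fun p => decide (pvGet g p.1 p.2 = "@" ∧ pvCountA g rows cols p.1 p.2 < 4))

-- applying all removals of a round
def pApply (l : List (Int × Int)) (g : List (List String)) : List (List String) :=
  l.foldl (fun h p => pvSetA h p.1 p.2 ".") g

-- neighbour count of (r,c) inside the coordinate set S (membership only)
def pvNbrs (S : List (Int × Int)) (r c : Int) : Int :=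
  pvDirs.foldl (fun s d => s + (if (r + d.1, c + d.2) ∈ S then 1 else 0)) 0

-- one synchronous peeling round on a coordinate set, and its fixed point:
-- the reference semantics both ports are reduced to
def pvKeep (S : List (Int × Int)) : List (Int × Int) :=
  S.filter (fun p => decide (4 ≤ pvNbrs S p.1 p.2))

theorem pvKeep_length_lt (S : List (Int × Int)) (h : pvKeep S ≠ S) :
    (pvKeep S).length < S.length := by
  rcases Nat.lt_or_ge (pvKeep S).length S.length with hlt | hge
  · exact hlt
  · exact absurd ((List.filter_sublist).eq_of_length
      (Nat.le_antisymm (List.length_filter_le _ _) hge)) h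

def pvLoopB (S : List (Int × Int)) : List (Int × Int) :=
  if h : pvKeep S = S then S else pvLoopB (pvKeep S)
termination_by S.length
decreasing_by exact pvKeep_length_lt S h

-- remaining alive cells, given the removed set
def pRem (alive removed : List (Int × Int)) : List (Int × Int) :=
  alive.filter (fun q => decide (q ∉ removed))

theorem mem_pvPairs (rows cols r c : Int) :
    (r, c) ∈ pvPairs rows cols ↔ 0 ≤ r ∧ r < rows ∧ 0 ≤ c ∧ c < cols := by
  simp only [pvPairs, List.mem_flatMap, List.mem_map, PySem.List.mem_pyRange_one, Prod.ext_iff]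
  constructor
  · rintro ⟨a, ⟨h1, h2⟩, b, ⟨h3, h4⟩, rfl, rfl⟩; exact ⟨h1, h2, h3, h4⟩
  · rintro ⟨h1, h2, h3, h4⟩; exact ⟨r, ⟨h1, h2⟩, ⟨c, ⟨h3, h4⟩, rfl, rfl⟩⟩

theorem length_pvPairs (rows cols : Int) :
    (pvPairs rows cols).length = rows.toNat * cols.toNat := by
  simp only [pvPairs, List.length_flatMap, List.length_map, PySem.List.length_pyRange_one]
  rw [List.map_const']
  simp

theorem nodup_pvPairs (rows cols : Int) : (pvPairs rows cols).Nodup := by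
  unfold pvPairs
  rw [List.nodup_flatMap]
  constructor
  · intro r _
    exact (PySem.List.nodup_pyRange_one _ _).map (fun a b h => by
      simpa using congrArg Prod.snd h)
  · refine (PySem.List.nodup_pyRange_one _ _).imp ?_
    intro a b hab
    rw [Function.onFun, List.disjoint_left]
    intro x hxa hxb
    rw [List.mem_map] at hxa hxb
    obtain ⟨c1, _, rfl⟩ := hxa
    obtain ⟨c2, _, he⟩ := hxb
    exact hab (congrArg Prod.fst he).symm

theorem pvGet_eq_getElem (g : List (List String)) {r c : Int} (hr0 : 0 ≤ r)
    (hr : r.toNat < g.length) (hc0 : 0 ≤ c) (hc : c.toNat < g[r.toNat].length) :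
    pvGet g r c = g[r.toNat][c.toNat] := by
  unfold pvGet
  rw [PySem.List.pyGetD_eq_getElem g [] hr0 (by omega),
    PySem.List.pyGetD_eq_getElem _ "" hc0 (by omega)]

theorem pGOK_setA {g : List (List String)} {rows cols : Int} (hg : pGOK g rows cols)
    (r c : Int) (v : String) : pGOK (pvSetA g r c v) rows cols := by
  obtain ⟨h1, h2⟩ := hg
  refine ⟨by simpa [pvSetA] using h1, ?_⟩
  intro i hi
  simp only [pvSetA, List.length_modify] at hi
  unfold pvSetA
  rw [List.getElem_modify]
  split
  · simpa using h2 i hi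
  · exact h2 i hi

theorem pvGet_setA {g : List (List String)} {rows cols : Int} (hg : pGOK g rows cols)
    {a b r c : Int} (ha : 0 ≤ a ∧ a < rows ∧ 0 ≤ b ∧ b < cols)
    (hr : 0 ≤ r ∧ r < rows ∧ 0 ≤ c ∧ c < cols) (v : String) :
    pvGet (pvSetA g a b v) r c = if a = r ∧ b = c then v else pvGet g r c := by
  obtain ⟨hg1, hg2⟩ := hg
  obtain ⟨ha0, ha1, hb0, hb1⟩ := ha
  obtain ⟨hr0, hr1, hc0, hc1⟩ := hr
  have hrl : r.toNat < g.length := by omega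
  have hcl : c.toNat < g[r.toNat].length := by have := hg2 r.toNat hrl; omega
  have hset : r.toNat < (pvSetA g a b v).length := by simp [pvSetA]; omega
  have hsetc : c.toNat < (pvSetA g a b v)[r.toNat].length := by
    unfold pvSetA
    rw [List.getElem_modify]
    split
    · simp; omega
    · omega
  rw [pvGet_eq_getElem _ hr0 hset hc0 hsetc, pvGet_eq_getElem _ hr0 hrl hc0 hcl]
  unfold pvSetA
  by_cases har : a = r
  · have har' : a.toNat = r.toNat := by omega
    by_cases hbc : b = c
    · have hbc' : b.toNat = c.toNat := by omega
      simp [har', hbc', har, hbc]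
    · have hbc' : b.toNat ≠ c.toNat := by omega
      simp [har', hbc', hbc]
  · have har' : a.toNat ≠ r.toNat := by omega
    simp [har', har]

theorem pGOK_apply {rows cols : Int} :
    ∀ (l : List (Int × Int)) {g : List (List String)}, pGOK g rows cols →
    pGOK (pApply l g) rows cols := by
  intro l
  induction l with
  | nil => intro g hg; exact hg
  | cons q t ih => intro g hg; exact ih (pGOK_setA hg q.1 q.2 ".")

theorem pvGet_apply {rows cols : Int} :
    ∀ (l : List (Int × Int)) {g : List (List String)}, pGOK g rows cols →
    (∀ p ∈ l, 0 ≤ p.1 ∧ p.1 < rows ∧ 0 ≤ p.2 ∧ p.2 < cols) →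
    ∀ {r c : Int}, (0 ≤ r ∧ r < rows ∧ 0 ≤ c ∧ c < cols) →
    pvGet (pApply l g) r c = if (r, c) ∈ l then "." else pvGet g r c := by
  intro l
  induction l with
  | nil => intro g hg hl r c hr; simp [pApply]
  | cons q t ih =>
    intro g hg hl r c hr
    have hq := hl q (by simp)
    have step : pApply (q :: t) g = pApply t (pvSetA g q.1 q.2 ".") := rfl
    rw [step, ih (pGOK_setA hg q.1 q.2 ".") (fun p hp => hl p (by simp [hp])) hr]
    by_cases hmem : (r, c) ∈ t
    · simp [hmem]
    · rw [if_neg hmem]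
      rw [pvGet_setA hg hq hr]
      by_cases hqe : q = (r, c)
      · have : q.1 = r ∧ q.2 = c := by rw [hqe]; exact ⟨rfl, rfl⟩
        simp [this, hqe]
      · have : ¬(q.1 = r ∧ q.2 = c) := by
          intro ⟨h1, h2⟩; exact hqe (Prod.ext h1 h2)
        have hqe' : (r, c) ≠ q := fun h => hqe h.symm
        simp [this, hqe', hmem]

theorem pvRoundA_eq (g : List (List String)) (rows cols : Int) :
    pvRoundA g rows cols =
      (pApply (pRemoved g rows cols) g, ((pRemoved g rows cols).length : Int)) := by
  have h1 : pvRoundA g rows cols =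
      (pvPairs rows cols).foldl (fun st p =>
        if pvGet g p.1 p.2 ≠ "@" then st
        else if pvCountA g rows cols p.1 p.2 < 4 then (pvSetA st.1 p.1 p.2 ".", st.2 + 1)
        else st) (g, 0) := by
    rw [pvPairs, List.foldl_flatMap]
    unfold pvRoundA
    congr 1
    funext st r
    rw [List.foldl_map]
  rw [h1]
  have hcongr := PySem.List.foldl_congr_mem
    (l := pvPairs rows cols) (init := (g, (0 : Int)))
    (f := fun st (p : Int × Int) =>
      if pvGet g p.1 p.2 ≠ "@" then st
      else if pvCountA g rows cols p.1 p.2 < 4 then (pvSetA st.1 p.1 p.2 ".", st.2 + 1)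
      else st)
    (g := fun st (p : Int × Int) =>
      if decide (pvGet g p.1 p.2 = "@" ∧ pvCountA g rows cols p.1 p.2 < 4) = true
      then (pvSetA st.1 p.1 p.2 ".", st.2 + 1) else st)
    (by intro st p _
        by_cases h1 : pvGet g p.1 p.2 = "@" <;> by_cases h2 : pvCountA g rows cols p.1 p.2 < 4 <;>
          simp [h1, h2])
  rw [hcongr]
  rw [PySem.List.foldl_if_eq_foldl_filter]
  rw [PySem.List.foldl_prod_mk (f := fun h (p : Int × Int) => pvSetA h p.1 p.2 ".")
    (g := fun (n : Int) (_ : Int × Int) => n + 1)]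
  unfold pRemoved pApply
  congr 1
  have := PySem.List.foldl_add (l := (pvPairs rows cols).filter
    (fun p => decide (pvGet g p.1 p.2 = "@" ∧ pvCountA g rows cols p.1 p.2 < 4)))
    (g := fun (_ : Int × Int) => (1 : Int)) (a := (0 : Int))
  simp at this ⊢
  omega

theorem foldl_if_one {α : Type} (l : List α) (P Q : α → Prop) [DecidablePred P] [DecidablePred Q]
    (h : ∀ x ∈ l, P x ↔ Q x) :
    ∀ (s : Int), l.foldl (fun s x => s + (if P x then 1 else 0)) s
      = l.foldl (fun s x => if Q x then s + 1 else s) s := by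
  induction l with
  | nil => intro s; rfl
  | cons x t ih =>
    intro s
    have hx := h x (by simp)
    simp only [List.foldl_cons]
    rw [ih (fun y hy => h y (by simp [hy]))]
    by_cases hp : P x
    · rw [if_pos hp, if_pos (hx.mp hp)]
    · rw [if_neg hp, if_neg (fun hq => hp (hx.mpr hq))]; simp

theorem pvNbrs_eq_count (g : List (List String)) (rows cols r c : Int) :
    pvNbrs (pAliveI g rows cols) r c = pvCountA g rows cols r c := by
  unfold pvNbrs pvCountA
  rw [foldl_if_one pvDirs
    (P := fun d : Int × Int => (r + d.1, c + d.2) ∈ pAliveI g rows cols)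
    (Q := fun d : Int × Int =>
      (0 ≤ r + d.1 ∧ r + d.1 < rows ∧ 0 ≤ c + d.2 ∧ c + d.2 < cols) ∧ pvGet g (r + d.1) (c + d.2) = "@")
    (by intro d _
        show (r + d.1, c + d.2) ∈ pAliveI g rows cols ↔ _
        unfold pAliveI
        rw [List.mem_filter, mem_pvPairs]
        simp)]
  apply PySem.List.foldl_congr_mem
  intro s d _
  by_cases h1 : 0 ≤ r + d.1 ∧ r + d.1 < rows ∧ 0 ≤ c + d.2 ∧ c + d.2 < cols <;>
    by_cases h2 : pvGet g (r + d.1) (c + d.2) = "@" <;> simp [h1, h2]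

theorem pRemoved_bounds {g : List (List String)} {rows cols : Int} :
    ∀ p ∈ pRemoved g rows cols, 0 ≤ p.1 ∧ p.1 < rows ∧ 0 ≤ p.2 ∧ p.2 < cols := by
  rintro ⟨r, c⟩ hp
  rw [pRemoved, List.mem_filter] at hp
  exact (mem_pvPairs rows cols r c).mp hp.1

theorem pAliveI_apply {g : List (List String)} {rows cols : Int} (hg : pGOK g rows cols) :
    pAliveI (pApply (pRemoved g rows cols) g) rows cols = pvKeep (pAliveI g rows cols) := by
  have h1 : pAliveI (pApply (pRemoved g rows cols) g) rows cols
      = (pvPairs rows cols).filter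
          (fun p => decide (pvGet g p.1 p.2 = "@" ∧ ¬ pvCountA g rows cols p.1 p.2 < 4)) := by
    unfold pAliveI
    apply List.filter_congr
    rintro ⟨r, c⟩ hp
    have hb := (mem_pvPairs rows cols r c).mp hp
    rw [pvGet_apply (pRemoved g rows cols) hg pRemoved_bounds hb]
    have hmem : (r, c) ∈ pRemoved g rows cols ↔
        (pvGet g r c = "@" ∧ pvCountA g rows cols r c < 4) := by
      rw [pRemoved, List.mem_filter]
      simp [hp]
    by_cases h1 : pvGet g r c = "@" <;> by_cases h2 : pvCountA g rows cols r c < 4 <;>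
      simp [hmem, h1, h2]
  rw [h1]
  have h2 : pvKeep (pAliveI g rows cols)
      = (pAliveI g rows cols).filter (fun p => decide (4 ≤ pvCountA g rows cols p.1 p.2)) := by
    unfold pvKeep
    apply List.filter_congr
    rintro ⟨r, c⟩ hp
    rw [pvNbrs_eq_count]
  rw [h2]
  unfold pAliveI
  rw [List.filter_filter]
  apply List.filter_congr
  rintro ⟨r, c⟩ hp
  by_cases h1 : pvGet g r c = "@" <;> by_cases h2 : pvCountA g rows cols r c < 4 <;>
    simp [h1, h2] <;> omega

theorem pRemoved_add_keep {g : List (List String)} {rows cols : Int} :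
    (pRemoved g rows cols).length + (pvKeep (pAliveI g rows cols)).length
      = (pAliveI g rows cols).length := by
  have hrem : pRemoved g rows cols
      = (pAliveI g rows cols).filter (fun p => decide (pvCountA g rows cols p.1 p.2 < 4)) := by
    unfold pRemoved pAliveI
    rw [List.filter_filter]
    apply List.filter_congr
    rintro ⟨r, c⟩ hp
    by_cases h1 : pvGet g r c = "@" <;> by_cases h2 : pvCountA g rows cols r c < 4 <;>
      simp [h1, h2]
  have hkeep : pvKeep (pAliveI g rows cols)
      = (pAliveI g rows cols).filter
          (fun p => !decide (pvCountA g rows cols p.1 p.2 < 4)) := by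
    unfold pvKeep
    apply List.filter_congr
    rintro ⟨r, c⟩ hp
    rw [pvNbrs_eq_count]
    by_cases h2 : pvCountA g rows cols r c < 4 <;> simp [h2] <;> omega
  rw [hrem, hkeep]
  exact (List.length_eq_length_filter_add _).symm

theorem pKeep_iff_removed_nil {g : List (List String)} {rows cols : Int} :
    pvKeep (pAliveI g rows cols) = pAliveI g rows cols ↔ pRemoved g rows cols = [] := by
  have hrem : pRemoved g rows cols
      = (pAliveI g rows cols).filter (fun p => decide (pvCountA g rows cols p.1 p.2 < 4)) := by
    unfold pRemoved pAliveI
    rw [List.filter_filter]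
    apply List.filter_congr
    rintro ⟨r, c⟩ hp
    by_cases h1 : pvGet g r c = "@" <;> by_cases h2 : pvCountA g rows cols r c < 4 <;>
      simp [h1, h2]
  have hkeep : pvKeep (pAliveI g rows cols)
      = (pAliveI g rows cols).filter
          (fun p => !decide (pvCountA g rows cols p.1 p.2 < 4)) := by
    unfold pvKeep
    apply List.filter_congr
    rintro ⟨r, c⟩ hp
    rw [pvNbrs_eq_count]
    by_cases h2 : pvCountA g rows cols r c < 4 <;> simp [h2] <;> omega
  rw [hrem, hkeep, List.filter_eq_self, List.filter_eq_nil_iff]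
  constructor
  · intro h p hp
    have := h p hp
    simp at this ⊢
    omega
  · intro h p hp
    have := h p hp
    simp at this ⊢
    omega

theorem pFix_iff {g : List (List String)} {rows cols : Int} (hg : pGOK g rows cols) :
    pApply (pRemoved g rows cols) g = g
      ↔ pvKeep (pAliveI g rows cols) = pAliveI g rows cols := by
  rw [pKeep_iff_removed_nil]
  constructor
  · intro happ
    by_contra hne
    obtain ⟨⟨r, c⟩, t, heq⟩ := List.exists_cons_of_ne_nil hne
    have hmem : (r, c) ∈ pRemoved g rows cols := by rw [heq]; simp
    have hb : 0 ≤ r ∧ r < rows ∧ 0 ≤ c ∧ c < cols := pRemoved_bounds _ hmem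
    have hat : pvGet g r c = "@" := by
      have := (List.mem_filter.mp (by rw [pRemoved] at hmem; exact hmem)).2
      simp at this
      exact this.1
    have hdot : pvGet (pApply (pRemoved g rows cols) g) r c = "." := by
      rw [pvGet_apply (pRemoved g rows cols) hg pRemoved_bounds hb, if_pos hmem]
    rw [happ, hat] at hdot
    simp at hdot
  · intro h
    rw [h]
    rfl

theorem pvLoopA_eq {rows cols : Int} :
    ∀ (fuel : Nat) (g : List (List String)) (res : Int), pGOK g rows cols →
      (pAliveI g rows cols).length < fuel →
      pvLoopA fuel g rows cols res =
        res + ((pAliveI g rows cols).length : Int)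
            - ((pvLoopB (pAliveI g rows cols)).length : Int) := by
  intro fuel
  induction fuel with
  | zero => intro g res hg hlt; omega
  | succ fuel ih =>
    intro g res hg hlt
    rw [pvLoopA]
    simp only [pvRoundA_eq g rows cols]
    by_cases hfix : pvKeep (pAliveI g rows cols) = pAliveI g rows cols
    · have happ : pApply (pRemoved g rows cols) g = g := (pFix_iff hg).mpr hfix
      have hrem : pRemoved g rows cols = [] := pKeep_iff_removed_nil.mp hfix
      rw [pvLoopB, dif_pos hfix]
      rw [hrem] at happ ⊢
      simp [happ]
    · have happ : pApply (pRemoved g rows cols) g ≠ g :=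
        fun h => hfix ((pFix_iff hg).mp h)
      have hrem : pRemoved g rows cols ≠ [] :=
        fun h => hfix (pKeep_iff_removed_nil.mpr h)
      have hsum := pRemoved_add_keep (g := g) (rows := rows) (cols := cols)
      have hremlen : 0 < (pRemoved g rows cols).length := List.length_pos_iff.mpr hrem
      have hg' : pGOK (pApply (pRemoved g rows cols) g) rows cols := pGOK_apply _ hg
      have halive : pAliveI (pApply (pRemoved g rows cols) g) rows cols
          = pvKeep (pAliveI g rows cols) := pAliveI_apply hg
      simp only [happ, ite_false]
      rw [ih _ _ hg' (by rw [halive]; omega)]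
      rw [halive]
      conv_rhs => rw [pvLoopB, dif_neg hfix]
      omega

-- ---- B-side lemmas: the worklist cascade reaches the same fixed point ----

theorem foldl_ind_le (l : List (Int × Int)) (P Q : (Int × Int) → Prop)
    [DecidablePred P] [DecidablePred Q] (h : ∀ d, P d → Q d) :
    ∀ (s t : Int), s ≤ t →
      l.foldl (fun s d => s + (if P d then 1 else 0)) s
        ≤ l.foldl (fun s d => s + (if Q d then 1 else 0)) t := by
  induction l with
  | nil => intro s t hst; exact hst
  | cons d l ih =>
    intro s t hst
    simp only [List.foldl_cons]
    apply ih
    by_cases hp : P d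
    · rw [if_pos hp, if_pos (h d hp)]; omega
    · rw [if_neg hp]; split <;> omega

theorem pvNbrs_le (S T : List (Int × Int)) (r c : Int) (h : ∀ x, x ∈ S → x ∈ T) :
    pvNbrs S r c ≤ pvNbrs T r c := by
  unfold pvNbrs
  exact foldl_ind_le pvDirs _ _ (fun d hd => h _ hd) 0 0 le_rfl

theorem mem_pRem (alive removed : List (Int × Int)) (q : Int × Int) :
    q ∈ pRem alive removed ↔ q ∈ alive ∧ q ∉ removed := by
  simp [pRem]

theorem pRem_nil (alive : List (Int × Int)) : pRem alive [] = alive := by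
  simp [pRem]

theorem pRem_nodup {alive : List (Int × Int)} (h : alive.Nodup)
    (removed : List (Int × Int)) : (pRem alive removed).Nodup :=
  h.filter _

theorem pvSupport_eq (alive removed : List (Int × Int)) (p : Int × Int) :
    pvSupport alive removed p = pvNbrs (pRem alive removed) p.1 p.2 := by
  unfold pvSupport pvNbrs
  apply PySem.List.foldl_congr_mem
  intro s d _
  by_cases h1 : (p.1 + d.1, p.2 + d.2) ∈ alive <;>
    by_cases h2 : (p.1 + d.1, p.2 + d.2) ∈ removed <;>
      simp [pRem, List.mem_filter, h1, h2]

theorem pvLoopB_sublist (S : List (Int × Int)) : List.Sublist (pvLoopB S) S := by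
  induction S using pvLoopB.induct with
  | case1 S h => rw [pvLoopB, dif_pos h]
  | case2 S h ih => rw [pvLoopB, dif_neg h]; exact ih.trans List.filter_sublist

theorem pvLoopB_fixed (S : List (Int × Int)) : pvKeep (pvLoopB S) = pvLoopB S := by
  induction S using pvLoopB.induct with
  | case1 S h => rw [pvLoopB, dif_pos h]; exact h
  | case2 S h ih => rw [pvLoopB, dif_neg h]; exact ih

theorem pvLoopB_support {S : List (Int × Int)} {x : Int × Int} (hx : x ∈ pvLoopB S) :
    4 ≤ pvNbrs (pvLoopB S) x.1 x.2 := by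
  rw [← pvLoopB_fixed S] at hx
  have := List.mem_filter.mp hx
  simpa using this.2

theorem pvLoopB_greatest :
    ∀ (S T : List (Int × Int)), (∀ x ∈ T, x ∈ S) → (∀ p ∈ T, 4 ≤ pvNbrs T p.1 p.2) →
      ∀ x ∈ T, x ∈ pvLoopB S := by
  intro S
  induction S using pvLoopB.induct with
  | case1 S h =>
    intro T hTS _ x hx
    rw [pvLoopB, dif_pos h]
    exact hTS x hx
  | case2 S h ih =>
    intro T hTS hsup x hx
    rw [pvLoopB, dif_neg h]
    refine ih T ?_ hsup x hx
    intro y hy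
    unfold pvKeep
    rw [List.mem_filter]
    refine ⟨hTS y hy, ?_⟩
    simpa using le_trans (hsup y hy) (pvNbrs_le T S y.1 y.2 hTS)

theorem len_eq_of_mem_iff {S T : List (Int × Int)} (hS : S.Nodup) (hT : T.Nodup)
    (h : ∀ x, x ∈ S ↔ x ∈ T) : S.length = T.length :=
  ((List.perm_ext_iff_of_nodup hS hT).mpr h).length_eq

theorem filter_ne_length {l : List (Int × Int)} (hl : l.Nodup) {p : Int × Int}
    (hp : p ∈ l) : (l.filter (fun q => decide (q ≠ p))).length + 1 = l.length := by
  induction l with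
  | nil => cases hp
  | cons a t ih =>
    rw [List.nodup_cons] at hl
    rcases List.mem_cons.mp hp with rfl | hpt
    · simp only [List.filter_cons]
      rw [if_neg (by simp)]
      have ht : t.filter (fun q => decide (q ≠ p)) = t :=
        List.filter_eq_self.mpr (fun q hq => by
          simp only [decide_eq_true_eq]
          rintro rfl
          exact hl.1 hq)
      rw [ht]
      simp
    · simp only [List.filter_cons]
      rw [if_pos (by
        simp only [decide_eq_true_eq]
        rintro rfl
        exact hl.1 hpt)]
      simp only [List.length_cons]
      have := ih hl.2 hpt
      omega

theorem pRem_snoc_len {alive : List (Int × Int)} (hA : alive.Nodup)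
    (removed : List (Int × Int)) (p : Int × Int) (hpA : p ∈ alive) (hpR : p ∉ removed) :
    (pRem alive (removed ++ [p])).length + 1 = (pRem alive removed).length := by
  have h1 : pRem alive (removed ++ [p])
      = (pRem alive removed).filter (fun q => decide (q ≠ p)) := by
    unfold pRem
    rw [List.filter_filter]
    apply List.filter_congr
    intro q _
    by_cases h2 : q ∈ removed <;> by_cases h3 : q = p <;>
      simp [List.mem_append, h2, h3]
  have h2 : p ∈ pRem alive removed := (mem_pRem _ _ _).mpr ⟨hpA, hpR⟩
  rw [h1]
  exact filter_ne_length (pRem_nodup hA removed) h2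

theorem pvDirs_neg : ∀ d ∈ pvDirs, ((-d.1, -d.2) : Int × Int) ∈ pvDirs := by decide

theorem pvSupport_snoc_far (alive removed : List (Int × Int)) (p q : Int × Int)
    (h : ∀ d ∈ pvDirs, q ≠ (p.1 + d.1, p.2 + d.2)) :
    pvSupport alive (removed ++ [p]) q = pvSupport alive removed q := by
  unfold pvSupport
  apply PySem.List.foldl_congr_mem
  intro s d hd
  have hne : (q.1 + d.1, q.2 + d.2) ≠ p := by
    intro he
    apply h (-d.1, -d.2) (pvDirs_neg d hd)
    have h1 : q.1 + d.1 = p.1 := congrArg Prod.fst he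
    have h2 : q.2 + d.2 = p.2 := congrArg Prod.snd he
    rw [Prod.ext_iff]
    constructor <;> simp <;> omega
  by_cases h1 : (q.1 + d.1, q.2 + d.2) ∈ alive <;>
    by_cases h2 : (q.1 + d.1, q.2 + d.2) ∈ removed <;>
      simp [List.mem_append, h1, h2, hne]

-- when the worklist is empty, the remaining cells are self-supporting, hence = the core
theorem pvBFS_base {alive : List (Int × Int)} (hA : alive.Nodup)
    {removed : List (Int × Int)}
    (hC : ∀ x ∈ pvLoopB alive, x ∉ removed)
    (hI : ∀ q ∈ alive, q ∉ removed → 4 ≤ pvSupport alive removed q) :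
    (pRem alive removed).length = (pvLoopB alive).length := by
  apply len_eq_of_mem_iff (pRem_nodup hA removed) ((pvLoopB_sublist alive).nodup hA)
  intro x
  constructor
  · intro hx
    obtain ⟨hxa, hxr⟩ := (mem_pRem _ _ _).mp hx
    refine pvLoopB_greatest alive (pRem alive removed)
      (fun y hy => ((mem_pRem _ _ _).mp hy).1) ?_ x hx
    intro p hp
    obtain ⟨hpa, hpr⟩ := (mem_pRem _ _ _).mp hp
    have := hI p hpa hpr
    rwa [pvSupport_eq] at this
  · intro hx
    exact (mem_pRem _ _ _).mpr ⟨(pvLoopB_sublist alive).mem hx, hC x hx⟩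

theorem pvBFS_core {alive : List (Int × Int)} (hA : alive.Nodup) :
    ∀ (fuel : Nat) (removed pending : List (Int × Int)),
      removed.Nodup →
      (∀ x ∈ removed, x ∈ alive) →
      (∀ x ∈ pending, x ∈ alive) →
      (∀ x ∈ pvLoopB alive, x ∉ removed ∧ x ∉ pending) →
      (∀ q ∈ alive, q ∉ removed → pvSupport alive removed q < 4 → q ∈ pending) →
      pending.length + 9 * (pRem alive removed).length ≤ fuel →
      (pvBFS fuel alive removed pending).length + (pvLoopB alive).length
        = removed.length + (pRem alive removed).length := by
  intro fuel
  induction fuel with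
  | zero =>
    intro removed pending hN hRA hPA hC hI hF
    have hp : pending = [] := by
      cases pending with
      | nil => rfl
      | cons p rest => simp at hF
    subst hp
    have : pvBFS 0 alive removed [] = removed := rfl
    rw [this, pvBFS_base hA (fun x hx => (hC x hx).1)
      (fun q hq hqr => by
        by_contra hlt
        exact absurd (hI q hq hqr (by omega)) (by simp))]
  | succ fuel ih =>
    intro removed pending hN hRA hPA hC hI hF
    cases pending with
    | nil =>
      have : pvBFS (fuel + 1) alive removed [] = removed := rfl
      rw [this, pvBFS_base hA (fun x hx => (hC x hx).1)
        (fun q hq hqr => by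
          by_contra hlt
          exact absurd (hI q hq hqr (by omega)) (by simp))]
    | cons p rest =>
      by_cases hp : p ∈ removed
      · have hstep : pvBFS (fuel + 1) alive removed (p :: rest)
            = pvBFS fuel alive removed rest := by
          simp only [pvBFS, if_pos hp]
        rw [hstep]
        refine ih removed rest hN hRA (fun x hx => hPA x (by simp [hx])) ?_ ?_ (by simp at hF; omega)
        · intro x hx
          have := hC x hx
          exact ⟨this.1, fun hr => this.2 (by simp [hr])⟩
        · intro q hq hqr hql
          have := hI q hq hqr hql
          rcases List.mem_cons.mp this with rfl | h
          · exact absurd hp hqr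
          · exact h
      · have hstep : pvBFS (fuel + 1) alive removed (p :: rest)
            = pvBFS fuel alive (removed ++ [p])
                (rest ++ pvDirs.filterMap (fun d =>
                  let q := (p.1 + d.1, p.2 + d.2)
                  if q ∈ alive ∧ q ∉ removed ++ [p] ∧ pvSupport alive (removed ++ [p]) q < 4
                  then some q else none)) := by
          simp only [pvBFS, if_neg hp]
        set removed2 := removed ++ [p] with hrm2
        set pushes := pvDirs.filterMap (fun d =>
          let q := (p.1 + d.1, p.2 + d.2)
          if q ∈ alive ∧ q ∉ removed2 ∧ pvSupport alive removed2 q < 4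
          then some q else none) with hpushes
        have hpA : p ∈ alive := hPA p (by simp)
        have hmem2 : ∀ x, x ∈ removed2 ↔ x ∈ removed ∨ x = p := by
          intro x; simp [hrm2]
        have hcoreRem2 : ∀ y ∈ pvLoopB alive, y ∉ removed2 := by
          intro y hy
          obtain ⟨hy1, hy2⟩ := hC y hy
          rw [hmem2]
          rintro (h | rfl)
          · exact hy1 h
          · exact hy2 (by simp)
        have hcoreSup : ∀ x ∈ pvLoopB alive, 4 ≤ pvSupport alive removed2 x := by
          intro x hx
          rw [pvSupport_eq]
          refine le_trans (pvLoopB_support hx) (pvNbrs_le _ _ _ _ ?_)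
          intro y hy
          exact (mem_pRem _ _ _).mpr ⟨(pvLoopB_sublist alive).mem hy, hcoreRem2 y hy⟩
        have hmemPush : ∀ x, x ∈ pushes →
            x ∈ alive ∧ x ∉ removed2 ∧ pvSupport alive removed2 x < 4 := by
          intro x hx
          rw [hpushes, List.mem_filterMap] at hx
          obtain ⟨d, _, hfd⟩ := hx
          simp only at hfd
          split at hfd
          · rename_i hcond
            cases hfd
            exact hcond
          · cases hfd
        have hN2 : removed2.Nodup := by
          rw [hrm2, List.nodup_append]
          refine ⟨hN, List.nodup_singleton p, ?_⟩
          intro x hx b hb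
          rw [List.mem_singleton] at hb
          subst hb
          exact fun h => hp (h ▸ hx)
        have hRA2 : ∀ x ∈ removed2, x ∈ alive := by
          intro x hx
          rcases (hmem2 x).mp hx with h | rfl
          · exact hRA x h
          · exact hpA
        have hPA2 : ∀ x ∈ rest ++ pushes, x ∈ alive := by
          intro x hx
          rcases List.mem_append.mp hx with h | h
          · exact hPA x (by simp [h])
          · exact (hmemPush x h).1
        have hC2 : ∀ x ∈ pvLoopB alive, x ∉ removed2 ∧ x ∉ rest ++ pushes := by
          intro x hx
          refine ⟨hcoreRem2 x hx, ?_⟩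
          rw [List.mem_append]
          rintro (h | h)
          · exact (hC x hx).2 (by simp [h])
          · have := (hmemPush x h).2.2
            have := hcoreSup x hx
            omega
        have hI2 : ∀ q ∈ alive, q ∉ removed2 → pvSupport alive removed2 q < 4 →
            q ∈ rest ++ pushes := by
          intro q hq hqr hql
          by_cases hnb : ∃ d ∈ pvDirs, q = (p.1 + d.1, p.2 + d.2)
          · obtain ⟨d, hd, rfl⟩ := hnb
            refine List.mem_append_right _ ?_
            rw [hpushes, List.mem_filterMap]
            exact ⟨d, hd, by simp only [if_pos (⟨hq, hqr, hql⟩ :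
              (p.1 + d.1, p.2 + d.2) ∈ alive ∧ (p.1 + d.1, p.2 + d.2) ∉ removed2 ∧
                pvSupport alive removed2 (p.1 + d.1, p.2 + d.2) < 4)]⟩
          · push_neg at hnb
            rw [hrm2, pvSupport_snoc_far alive removed p q hnb] at hql
            have hqr' : q ∉ removed := fun h => hqr ((hmem2 q).mpr (Or.inl h))
            have hqp : q ≠ p := fun h => hqr ((hmem2 q).mpr (Or.inr h))
            rcases List.mem_cons.mp (hI q hq hqr' hql) with h | h
            · exact absurd h hqp
            · exact List.mem_append_left _ h
        have hpushlen : pushes.length ≤ 8 := by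
          rw [hpushes]
          exact le_trans (List.length_filterMap_le _ _) (by rfl)
        have hRlen := pRem_snoc_len hA removed p hpA hp
        rw [hstep]
        rw [ih removed2 (rest ++ pushes) hN2 hRA2 hPA2 hC2 hI2
          (by rw [List.length_append]
              have hRlen2 : (pRem alive removed2).length + 1 = (pRem alive removed).length := by
                rw [hrm2]; exact hRlen
              simp only [List.length_cons] at hF
              omega)]
        have hRlen2 : (pRem alive removed2).length + 1 = (pRem alive removed).length := by
          rw [hrm2]; exact hRlen
        have hr2len : removed2.length = removed.length + 1 := by
          rw [hrm2]; simp
        omega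

-- ===== VERDICT (by name: the statement is the Claim_ definition above) =====
theorem helper_spec : Claim_equal_helper := by
  intro grid _hdom hpre
  obtain ⟨hne, hrows⟩ := hpre
  unfold Spec_helper helper helper_alt
  simp only []
  set rows : Int := (grid.length : Int) with hR
  set cols : Int := ((PySem.List.pyGetD grid 0 []).length : Int) with hC
  have hGOK : pGOK grid rows cols := by
    constructor
    · simp [hR]
    · intro i hi
      have : grid[i] ∈ grid := List.getElem_mem hi
      have := hrows _ this
      simp [hC]
      omega
  have halive : pvAlive grid cols = pAliveI grid rows cols := rfl
  have hAnd : (pvAlive grid cols).Nodup := (nodup_pvPairs rows cols).filter _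
  have hlen : (pAliveI grid rows cols).length
      ≤ grid.length * (PySem.List.pyGetD grid 0 []).length := by
    have h1 : (pAliveI grid rows cols).length ≤ (pvPairs rows cols).length :=
      List.length_filter_le _ _
    rw [length_pvPairs] at h1
    simpa [hR, hC] using h1
  rw [pvLoopA_eq (grid.length * (PySem.List.pyGetD grid 0 []).length + 1) grid 0 hGOK
    (by omega)]
  -- B side
  set alive := pvAlive grid cols with hAl
  set q0 := alive.filter (fun p => decide (pvSupport alive [] p < 4)) with hq0
  have hB := pvBFS_core hAnd (q0.length + 9 * alive.length) [] q0
    (by simp)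
    (by simp)
    (fun x hx => List.mem_of_mem_filter hx)
    (by
      intro x hx
      refine ⟨by simp, ?_⟩
      intro hxq
      rw [hq0, List.mem_filter] at hxq
      have hlt : pvSupport alive [] x < 4 := by simpa using hxq.2
      rw [pvSupport_eq, pRem_nil] at hlt
      have h4 : 4 ≤ pvNbrs alive x.1 x.2 :=
        le_trans (pvLoopB_support hx) (pvNbrs_le _ _ _ _ (fun y hy => (pvLoopB_sublist alive).mem hy))
      omega)
    (by
      intro q hq _ hql
      rw [hq0, List.mem_filter]
      exact ⟨hq, by simpa using hql⟩)
    (by rw [pRem_nil])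
  rw [pRem_nil] at hB
  simp only [List.length_nil, Nat.zero_add] at hB
  rw [← halive]
  omega
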